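-- pv_equiv track=rewrite | github.com/dwihermawanandara-robo/scientific-literature-agent | app.py | is_metadata_line
-- ===== SOURCE A (Python) =====
-- def is_journal_header_line(line: str) -> bool:
--     lower = line.lower()
--     journal_keywords = [
--         "ieee transactions",
--         "ieee access",
--         "international journal",
--         "transactions on",
--         "vol.",
--         "no.",
--         "january",
--         "february",
--         "march",
--         "april",
--         "may",
--         "june",
--         "july",
--         "august",
--         "september",
--         "october",
--         "november",
--         "december",
--     ]
--     return any(keyword in lower for keyword in journal_keywords)
--
-- def is_metadata_line(line: str) -> bool:
--     lower = line.lower()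
--
--     metadata_keywords = [
--         "received",
--         "accepted",
--         "date of publication",
--         "date of current version",
--         "digital object identifier",
--         "doi",
--         "issn",
--         "www.",
--         "http",
--         "copyright",
--         "corresponding author",
--         "e-issn",
--         "p-issn",
--         "impact factor",
--         "page ",
--         "open access",
--     ]
--
--     if any(keyword in lower for keyword in metadata_keywords):
--         return True
--
--     if is_journal_header_line(line):
--         return True
--
--     return False
-- ===== SOURCE B (Python) =====
-- # One merged keyword table indexed by first character; a single left-to-right
-- # pass over the lowercased line tests, at each position, only the keywords that
-- # could start there.
-- _KEYWORDS = (
--     "received", "accepted", "date of publication", "date of current version",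
--     "digital object identifier", "doi", "issn", "www.", "http", "copyright",
--     "corresponding author", "e-issn", "p-issn", "impact factor", "page ",
--     "open access",
--     "ieee transactions", "ieee access", "international journal",
--     "transactions on", "vol.", "no.", "january", "february", "march", "april",
--     "may", "june", "july", "august", "september", "october", "november",
--     "december",
-- )
--
-- _BY_FIRST = {}
-- for _k in _KEYWORDS:
--     _BY_FIRST.setdefault(_k[0], []).append(_k)
--
-- def is_metadata_line(line: str) -> bool:
--     low = line.lower()
--     return any(low.startswith(k, i)
--                for i, c in enumerate(low)
--                for k in _BY_FIRST.get(c, ()))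
-- ===== Notes on version B (the rewrite author's own statement) =====
-- stated objective: alternative
-- what changed: B merges the metadata and journal-header keyword lists into one table indexed by first character and replaces A's K separate per-keyword substring membership scans (plus the helper call) with a single left-to-right pass over the lowercased line that tests, via startswith at each position, only the keywords whose first character matches.
import Mathlib
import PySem

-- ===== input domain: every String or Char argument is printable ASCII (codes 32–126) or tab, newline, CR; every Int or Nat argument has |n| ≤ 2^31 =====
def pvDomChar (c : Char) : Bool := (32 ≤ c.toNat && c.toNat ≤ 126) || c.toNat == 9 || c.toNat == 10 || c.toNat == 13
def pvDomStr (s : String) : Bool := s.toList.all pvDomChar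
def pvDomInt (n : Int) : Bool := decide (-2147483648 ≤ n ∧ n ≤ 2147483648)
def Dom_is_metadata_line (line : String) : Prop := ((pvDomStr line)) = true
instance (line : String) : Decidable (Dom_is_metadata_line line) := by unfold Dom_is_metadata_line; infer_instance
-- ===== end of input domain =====

-- B merges both keyword lists into one table indexed by first character and
-- makes a single pass over the lowercased line, testing at each position only
-- the keywords that could start there (objective: alternative single-pass scan
-- instead of A's K separate substring scans).

-- ===== PORT A =====
def pvJournalKeywords : List String :=
  ["ieee transactions", "ieee access", "international journal", "transactions on",
   "vol.", "no.", "january", "february", "march", "april", "may", "june", "july",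
   "august", "september", "october", "november", "december"]

def is_journal_header_line (line : String) : Bool :=
  let lower := PySem.Str.lower line
  pvJournalKeywords.any (fun k => PySem.Str.isIn k lower)

def pvMetadataKeywords : List String :=
  ["received", "accepted", "date of publication", "date of current version",
   "digital object identifier", "doi", "issn", "www.", "http", "copyright",
   "corresponding author", "e-issn", "p-issn", "impact factor", "page ",
   "open access"]

def is_metadata_line (line : String) : Bool :=
  let lower := PySem.Str.lower line
  if pvMetadataKeywords.any (fun k => PySem.Str.isIn k lower) then true
  else if is_journal_header_line line then true
  else false

-- ===== PORT B =====
def pvAllKeywords : List String :=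
  ["received", "accepted", "date of publication", "date of current version",
   "digital object identifier", "doi", "issn", "www.", "http", "copyright",
   "corresponding author", "e-issn", "p-issn", "impact factor", "page ",
   "open access",
   "ieee transactions", "ieee access", "international journal", "transactions on",
   "vol.", "no.", "january", "february", "march", "april", "may", "june", "july",
   "august", "september", "october", "november", "december"]

def pvFirstChar (k : String) : Char := k.toList.headD ' '  -- _k[0]; every keyword is nonempty

def pvByFirst : PySem.Dict Char (List String) :=
  pvAllKeywords.foldl
    (fun d k => d.insert (pvFirstChar k) (d.getD (pvFirstChar k) [] ++ [k]))
    PySem.Dict.empty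

def is_metadata_line_alt (line : String) : Bool :=
  let low := PySem.Str.lower line
  (PySem.List.enumerate low.toList).any (fun ic =>
    (pvByFirst.getD ic.2 []).any (fun k =>
      -- low.startswith(k, i): i comes from enumerate, so 0 ≤ i ≤ len(low) and
      -- Python's startswith-with-start is exactly startswith on the drop
      PySem.Chars.startswith (low.toList.drop ic.1.toNat) k.toList))

-- ===== PRECONDITION & SPEC =====
def Spec_is_metadata_line (line : String) (out : Bool) : Prop := out = is_metadata_line_alt line
instance (line : String) (out : Bool) : Decidable (Spec_is_metadata_line line out) := by unfold Spec_is_metadata_line; infer_instance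

-- ===== CLAIM (what is proved, stated in full; the proofs are below) =====
def Claim_equal_is_metadata_line : Prop := ∀ (line : String), Dom_is_metadata_line line → Spec_is_metadata_line line (is_metadata_line line)

-- ===== LEMMAS AND PROOFS =====

lemma pv_keywords_nonempty : ∀ k ∈ pvAllKeywords, k.toList ≠ [] := by decide

-- the first-character table built by the fold is a filter of the keyword list
lemma pv_fold_getD (KS : List String) (d : PySem.Dict Char (List String)) (c : Char) :
    (KS.foldl
      (fun d k => d.insert (pvFirstChar k) (d.getD (pvFirstChar k) [] ++ [k])) d).getD c []
    = d.getD c [] ++ KS.filter (fun k => pvFirstChar k == c) := by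
  induction KS generalizing d with
  | nil => simp
  | cons k t ih =>
    simp only [List.foldl_cons, List.filter_cons, ih, PySem.Dict.getD_insert]
    by_cases h : pvFirstChar k = c
    · simp [h]
    · simp [h, Ne.symm h, beq_iff_eq]

lemma pv_byFirst_getD (c : Char) :
    pvByFirst.getD c [] = pvAllKeywords.filter (fun k => pvFirstChar k == c) := by
  unfold pvByFirst
  rw [pv_fold_getD]
  simp

lemma pv_alt_eq (line : String) :
    is_metadata_line_alt line
      = pvAllKeywords.any (fun k => PySem.Str.isIn k (PySem.Str.lower line)) := by
  unfold is_metadata_line_alt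
  rw [Bool.eq_iff_iff]
  simp only [List.any_eq_true, pv_byFirst_getD, List.mem_filter,
    PySem.List.mem_enumerate_iff, PySem.Str.isIn_eq, PySem.Chars.startswith_iff]
  constructor
  · rintro ⟨ic, ⟨j, hj, rfl⟩, k, ⟨hk, _⟩, hpre⟩
    refine ⟨k, hk, ?_⟩
    exact (PySem.Chars.exists_prefix_drop_iff_isIn k.toList _).mp ⟨(0 + (j : Int)).toNat, hpre⟩
  · rintro ⟨k, hk, hin⟩
    obtain ⟨j, hj⟩ := (PySem.Chars.exists_prefix_drop_iff_isIn k.toList _).mpr hin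
    have hne : k.toList ≠ [] := pv_keywords_nonempty k hk
    obtain ⟨h, t, hkl⟩ : ∃ h t, k.toList = h :: t := by
      cases hkl : k.toList with
      | nil => exact absurd hkl hne
      | cons h t => exact ⟨h, t, rfl⟩
    set s := (PySem.Str.lower line).toList with hs
    have hjlt : j < s.length := by
      by_contra hge
      rw [List.drop_eq_nil_of_le (by omega)] at hj
      exact hne (List.prefix_nil.mp hj)
    have hsj : s[j]? = some h := by
      obtain ⟨u, hu⟩ := hj
      have : (s.drop j)[0]? = some h := by rw [← hu, hkl]; rfl
      simpa [List.getElem?_drop] using this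
    have hsj' : s[j] = h := by
      have := List.getElem?_eq_getElem (l := s) (i := j) hjlt
      rw [hsj] at this; exact (Option.some.injEq _ _).mp this.symm
    refine ⟨((j : Int), s[j]), ⟨j, hjlt, by simp⟩, k, ⟨hk, ?_⟩, ?_⟩
    · rw [hsj']
      simp [pvFirstChar, hkl]
    · simpa using hj

theorem pv_main (line : String) : is_metadata_line line = is_metadata_line_alt line := by
  rw [pv_alt_eq]
  unfold is_metadata_line is_journal_header_line
  have hsplit : pvAllKeywords = pvMetadataKeywords ++ pvJournalKeywords := by rfl
  rw [hsplit, List.any_append]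
  cases hm : pvMetadataKeywords.any (fun k => PySem.Str.isIn k (PySem.Str.lower line)) <;>
    cases hj : pvJournalKeywords.any (fun k => PySem.Str.isIn k (PySem.Str.lower line)) <;>
      (simp only [hm, hj]; decide)

-- ===== VERDICT (by name: the statement is the Claim_ definition above) =====
theorem is_metadata_line_spec : Claim_equal_is_metadata_line := by
  intro line _
  unfold Spec_is_metadata_line
  exact pv_main line
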